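-- pv_equiv track=rewrite | github.com/dannyJ848/SOMA | images/extractors/master_extractor.py | categorize_image
-- ===== SOURCE A (Python) =====
-- def categorize_image(title, description, source_type):
--     """Categorize image based on title, description and source."""
--     text = (title + ' ' + description).lower()
--
--     if source_type == 'anatomy':
--         if any(x in text for x in ['bone', 'skeleton', 'skull', 'vertebra', 'femur']):
--             return 'skeletal'
--         elif any(x in text for x in ['muscle', 'muscular', 'bicep']):
--             return 'muscular'
--         elif any(x in text for x in ['heart', 'cardio', 'vascular', 'artery']):
--             return 'cardiovascular'
--         elif any(x in text for x in ['brain', 'nerve', 'neuron', 'spinal', 'cerebrum']):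
--             return 'nervous'
--         elif any(x in text for x in ['digestive', 'stomach', 'intestine', 'liver']):
--             return 'digestive'
--         elif any(x in text for x in ['respiratory', 'lung', 'trachea']):
--             return 'respiratory'
--         elif any(x in text for x in ['urinary', 'kidney', 'bladder']):
--             return 'urinary'
--         elif any(x in text for x in ['reproductive', 'ovary', 'testis', 'uterus']):
--             return 'reproductive'
--         elif any(x in text for x in ['endocrine', 'thyroid', 'adrenal']):
--             return 'endocrine'
--         elif any(x in text for x in ['lymph', 'spleen', 'thymus']):
--             return 'lymphatic'
--         return 'general'
--
--     elif source_type == 'histology':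
--         if any(x in text for x in ['epithelial', 'epithelium', 'skin']):
--             return 'epithelial'
--         elif any(x in text for x in ['connective', 'bone', 'cartilage', 'adipose']):
--             return 'connective'
--         elif any(x in text for x in ['muscle', 'myocyte', 'sarcomere']):
--             return 'muscle'
--         elif any(x in text for x in ['nerve', 'neuron', 'neuroglia']):
--             return 'nervous'
--         return 'organ-systems'
--
--     elif source_type == 'pathology':
--         if any(x in text for x in ['cardio', 'heart', 'vascular']):
--             return 'cardiovascular'
--         elif any(x in text for x in ['pulm', 'lung', 'respira']):
--             return 'respiratory'
--         elif any(x in text for x in ['gi', 'gastro', 'intestine', 'colon']):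
--             return 'gastrointestinal'
--         elif any(x in text for x in ['derm', 'skin']):
--             return 'dermatology'
--         elif any(x in text for x in ['renal', 'kidney', 'urinary']):
--             return 'genitourinary'
--         elif any(x in text for x in ['heme', 'blood', 'leukemia', 'lymphoma']):
--             return 'hematology'
--         elif any(x in text for x in ['neuro', 'brain', 'nerve']):
--             return 'neurological'
--         elif any(x in text for x in ['bone', 'soft tissue', 'sarcoma']):
--             return 'musculoskeletal'
--         return 'general'
--
--     return 'general'
-- ===== SOURCE B (Python) =====
-- # Flat keyword index: for each source type, every keyword maps to (priority, category).
-- # The classification is recast as an optimization problem: scan ALL keywords, collect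
-- # every one that occurs in the text, and return the category of the minimum-priority
-- # match (min over matches), instead of an ordered early-return chain.
--
-- def _index(groups):
--     return {kw: (p, cat) for p, (kws, cat) in enumerate(groups) for kw in kws}
--
-- KEYWORD_INDEX = {
--     'anatomy': (_index([
--         (['bone', 'skeleton', 'skull', 'vertebra', 'femur'], 'skeletal'),
--         (['muscle', 'muscular', 'bicep'], 'muscular'),
--         (['heart', 'cardio', 'vascular', 'artery'], 'cardiovascular'),
--         (['brain', 'nerve', 'neuron', 'spinal', 'cerebrum'], 'nervous'),
--         (['digestive', 'stomach', 'intestine', 'liver'], 'digestive'),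
--         (['respiratory', 'lung', 'trachea'], 'respiratory'),
--         (['urinary', 'kidney', 'bladder'], 'urinary'),
--         (['reproductive', 'ovary', 'testis', 'uterus'], 'reproductive'),
--         (['endocrine', 'thyroid', 'adrenal'], 'endocrine'),
--         (['lymph', 'spleen', 'thymus'], 'lymphatic'),
--     ]), 'general'),
--     'histology': (_index([
--         (['epithelial', 'epithelium', 'skin'], 'epithelial'),
--         (['connective', 'bone', 'cartilage', 'adipose'], 'connective'),
--         (['muscle', 'myocyte', 'sarcomere'], 'muscle'),
--         (['nerve', 'neuron', 'neuroglia'], 'nervous'),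
--     ]), 'organ-systems'),
--     'pathology': (_index([
--         (['cardio', 'heart', 'vascular'], 'cardiovascular'),
--         (['pulm', 'lung', 'respira'], 'respiratory'),
--         (['gi', 'gastro', 'intestine', 'colon'], 'gastrointestinal'),
--         (['derm', 'skin'], 'dermatology'),
--         (['renal', 'kidney', 'urinary'], 'genitourinary'),
--         (['heme', 'blood', 'leukemia', 'lymphoma'], 'hematology'),
--         (['neuro', 'brain', 'nerve'], 'neurological'),
--         (['bone', 'soft tissue', 'sarcoma'], 'musculoskeletal'),
--     ]), 'general'),
-- }
--
--
-- def categorize_image(title, description, source_type):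
--     """Categorize image based on title, description and source."""
--     text = (title + ' ' + description).lower()
--     index, default = KEYWORD_INDEX.get(source_type, ({}, 'general'))
--     best = None
--     for kw, (p, cat) in index.items():
--         if kw in text and (best is None or p < best[0]):
--             best = (p, cat)
--     return best[1] if best is not None else default
-- ===== Notes on version B (the rewrite author's own statement) =====
-- stated objective: alternative
-- what changed: Replaces the ordered first-match elif chains by a flat per-source keyword->(priority,category) index and a single scan over all keywords that keeps the minimum-priority match (argmin over matches instead of early-return first-match).
import Mathlib
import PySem

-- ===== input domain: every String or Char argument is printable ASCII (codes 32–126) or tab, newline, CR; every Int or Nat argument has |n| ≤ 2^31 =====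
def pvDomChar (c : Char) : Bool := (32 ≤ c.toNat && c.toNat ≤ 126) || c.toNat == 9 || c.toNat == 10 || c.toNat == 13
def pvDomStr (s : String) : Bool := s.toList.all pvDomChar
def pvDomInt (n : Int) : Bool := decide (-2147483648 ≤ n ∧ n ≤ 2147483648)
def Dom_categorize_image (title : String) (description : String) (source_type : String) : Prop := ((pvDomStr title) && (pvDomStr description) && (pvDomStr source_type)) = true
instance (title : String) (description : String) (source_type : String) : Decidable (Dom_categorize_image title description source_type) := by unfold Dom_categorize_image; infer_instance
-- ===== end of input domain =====

-- B recasts A's ordered elif chains as an optimization: a flat keyword -> (priority, category)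
-- index per source, one scan over ALL keywords keeping the minimum-priority match (objective:
-- alternative); return value proved equal on all inputs.

-- ===== PORT A =====
def categorize_image (title : String) (description : String) (source_type : String) : String :=
  let text := PySem.Str.lower (title ++ " " ++ description)
  if source_type == "anatomy" then
    if ["bone", "skeleton", "skull", "vertebra", "femur"].any (fun x => PySem.Str.isIn x text) then "skeletal"
    else if ["muscle", "muscular", "bicep"].any (fun x => PySem.Str.isIn x text) then "muscular"
    else if ["heart", "cardio", "vascular", "artery"].any (fun x => PySem.Str.isIn x text) then "cardiovascular"
    else if ["brain", "nerve", "neuron", "spinal", "cerebrum"].any (fun x => PySem.Str.isIn x text) then "nervous"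
    else if ["digestive", "stomach", "intestine", "liver"].any (fun x => PySem.Str.isIn x text) then "digestive"
    else if ["respiratory", "lung", "trachea"].any (fun x => PySem.Str.isIn x text) then "respiratory"
    else if ["urinary", "kidney", "bladder"].any (fun x => PySem.Str.isIn x text) then "urinary"
    else if ["reproductive", "ovary", "testis", "uterus"].any (fun x => PySem.Str.isIn x text) then "reproductive"
    else if ["endocrine", "thyroid", "adrenal"].any (fun x => PySem.Str.isIn x text) then "endocrine"
    else if ["lymph", "spleen", "thymus"].any (fun x => PySem.Str.isIn x text) then "lymphatic"
    else "general"
  else if source_type == "histology" then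
    if ["epithelial", "epithelium", "skin"].any (fun x => PySem.Str.isIn x text) then "epithelial"
    else if ["connective", "bone", "cartilage", "adipose"].any (fun x => PySem.Str.isIn x text) then "connective"
    else if ["muscle", "myocyte", "sarcomere"].any (fun x => PySem.Str.isIn x text) then "muscle"
    else if ["nerve", "neuron", "neuroglia"].any (fun x => PySem.Str.isIn x text) then "nervous"
    else "organ-systems"
  else if source_type == "pathology" then
    if ["cardio", "heart", "vascular"].any (fun x => PySem.Str.isIn x text) then "cardiovascular"
    else if ["pulm", "lung", "respira"].any (fun x => PySem.Str.isIn x text) then "respiratory"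
    else if ["gi", "gastro", "intestine", "colon"].any (fun x => PySem.Str.isIn x text) then "gastrointestinal"
    else if ["derm", "skin"].any (fun x => PySem.Str.isIn x text) then "dermatology"
    else if ["renal", "kidney", "urinary"].any (fun x => PySem.Str.isIn x text) then "genitourinary"
    else if ["heme", "blood", "leukemia", "lymphoma"].any (fun x => PySem.Str.isIn x text) then "hematology"
    else if ["neuro", "brain", "nerve"].any (fun x => PySem.Str.isIn x text) then "neurological"
    else if ["bone", "soft tissue", "sarcoma"].any (fun x => PySem.Str.isIn x text) then "musculoskeletal"
    else "general"
  else "general"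

-- ===== PORT B =====
-- Source B's group data (arguments of _index in Source B)
def pvAnatomyGroups : List (List String × String) :=
  [(["bone", "skeleton", "skull", "vertebra", "femur"], "skeletal"),
   (["muscle", "muscular", "bicep"], "muscular"),
   (["heart", "cardio", "vascular", "artery"], "cardiovascular"),
   (["brain", "nerve", "neuron", "spinal", "cerebrum"], "nervous"),
   (["digestive", "stomach", "intestine", "liver"], "digestive"),
   (["respiratory", "lung", "trachea"], "respiratory"),
   (["urinary", "kidney", "bladder"], "urinary"),
   (["reproductive", "ovary", "testis", "uterus"], "reproductive"),
   (["endocrine", "thyroid", "adrenal"], "endocrine"),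
   (["lymph", "spleen", "thymus"], "lymphatic")]

def pvHistologyGroups : List (List String × String) :=
  [(["epithelial", "epithelium", "skin"], "epithelial"),
   (["connective", "bone", "cartilage", "adipose"], "connective"),
   (["muscle", "myocyte", "sarcomere"], "muscle"),
   (["nerve", "neuron", "neuroglia"], "nervous")]

def pvPathologyGroups : List (List String × String) :=
  [(["cardio", "heart", "vascular"], "cardiovascular"),
   (["pulm", "lung", "respira"], "respiratory"),
   (["gi", "gastro", "intestine", "colon"], "gastrointestinal"),
   (["derm", "skin"], "dermatology"),
   (["renal", "kidney", "urinary"], "genitourinary"),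
   (["heme", "blood", "leukemia", "lymphoma"], "hematology"),
   (["neuro", "brain", "nerve"], "neurological"),
   (["bone", "soft tissue", "sarcoma"], "musculoskeletal")]

-- Source B's _index: {kw: (p, cat) for p, (kws, cat) in enumerate(groups) for kw in kws}
def pvIndex (groups : List (List String × String)) : PySem.Dict String (Int × String) :=
  PySem.Dict.ofList
    ((PySem.List.enumerate groups).flatMap (fun pg => pg.2.1.map (fun kw => (kw, (pg.1, pg.2.2)))))

-- Source B's KEYWORD_INDEX
def pvKeywordIndex : PySem.Dict String (PySem.Dict String (Int × String) × String) :=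
  PySem.Dict.ofList
    [("anatomy", (pvIndex pvAnatomyGroups, "general")),
     ("histology", (pvIndex pvHistologyGroups, "organ-systems")),
     ("pathology", (pvIndex pvPathologyGroups, "general"))]

-- Source B's 'for kw, (p, cat) in index.items(): if kw in text and (best is None or p < best[0]): best = (p, cat)'
def pvLoop (text : String) : List (String × Int × String) → Option (Int × String) → Option (Int × String)
  | [], best => best
  | (kw, pc) :: rest, best =>
      pvLoop text rest
        (if PySem.Str.isIn kw text &&
            (match best with | none => true | some b => decide (pc.1 < b.1)) then some pc else best)

def categorize_image_alt (title : String) (description : String) (source_type : String) : String :=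
  let text := PySem.Str.lower (title ++ " " ++ description)
  let td := PySem.Dict.getD pvKeywordIndex source_type (PySem.Dict.empty, "general")
  match pvLoop text td.1.items none with
  | some b => b.2
  | none => td.2

-- ===== PRECONDITION & SPEC =====
def Spec_categorize_image (title : String) (description : String) (source_type : String) (out : String) : Prop := out = categorize_image_alt title description source_type
instance (title : String) (description : String) (source_type : String) (out : String) : Decidable (Spec_categorize_image title description source_type out) := by unfold Spec_categorize_image; infer_instance

-- ===== CLAIM =====
def Claim_equal_categorize_image : Prop := ∀ (title : String) (description : String) (source_type : String), Dom_categorize_image title description source_type → Spec_categorize_image title description source_type (categorize_image title description source_type)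

-- ===== LEMMAS AND PROOFS =====

-- first-match reading of A's elif chains
def pvFM (text : String) : List (List String × String) → String → String
  | [], d => d
  | (kws, c) :: rest, d => if kws.any (fun k => PySem.Str.isIn k text) then c else pvFM text rest d

-- the flat keyword list with group priorities (= items of pvIndex, checked per source below)
def pvFlat : Int → List (List String × String) → List (String × Int × String)
  | _, [] => []
  | i, (kws, c) :: rest => kws.map (fun k => (k, i, c)) ++ pvFlat (i + 1) rest

lemma pvLoop_append (text : String) (l1 l2 : List (String × Int × String)) (b : Option (Int × String)) :
    pvLoop text (l1 ++ l2) b = pvLoop text l2 (pvLoop text l1 b) := by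
  induction l1 generalizing b with
  | nil => rfl
  | cons e rest ih => cases e with | mk kw pc => simp [pvLoop, ih]

-- once a match of priority p is held, entries of priority ≥ p never replace it
lemma pvLoop_ge (text : String) (l : List (String × Int × String)) (p : Int) (c : String)
    (h : ∀ e ∈ l, p ≤ e.2.1) : pvLoop text l (some (p, c)) = some (p, c) := by
  induction l with
  | nil => rfl
  | cons e rest ih =>
      cases e with | mk kw pc =>
      have hp : p ≤ pc.1 := h (kw, pc) (by simp)
      simp only [pvLoop]
      rw [if_neg (by simp only [Bool.and_eq_true, decide_eq_true_eq, not_and]; intro _; omega)]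
      exact ih (fun e he => h e (by simp [he]))

-- scanning one keyword group from 'best = None' yields its category iff any keyword occurs
lemma pvLoop_group (text : String) (kws : List String) (i : Int) (c : String) :
    pvLoop text (kws.map (fun k => (k, i, c))) none =
      if kws.any (fun k => PySem.Str.isIn k text) then some (i, c) else none := by
  induction kws with
  | nil => rfl
  | cons k rest ih =>
      simp only [List.map_cons, pvLoop, List.any_cons]
      by_cases hk : k.toList <:+: text.toList
      · rw [if_pos (by simp [pysem, hk]), if_pos (by simp [pysem, hk])]
        exact pvLoop_ge text _ i c (by
          intro e he
          obtain ⟨k', _, rfl⟩ := List.mem_map.mp he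
          simp)
      · rw [if_neg (by simp [pysem, hk])]
        rw [ih]
        by_cases hr : (rest.any (fun k => PySem.Str.isIn k text)) = true
        · rw [if_pos hr, if_pos (by simp [pysem, hk]; simpa [pysem] using hr)]
        · rw [if_neg hr, if_neg (by rw [Bool.not_eq_true] at hr; simp [pysem, hk]; simpa [pysem] using hr)]

lemma pvFlat_ge (gs : List (List String × String)) : ∀ (i : Int), ∀ e ∈ pvFlat i gs, i ≤ e.2.1 := by
  induction gs with
  | nil => intro i e he; simp [pvFlat] at he
  | cons g rest ih =>
      intro i e he
      cases g with | mk kws c =>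
      simp only [pvFlat, List.mem_append, List.mem_map] at he
      rcases he with ⟨k, _, rfl⟩ | he
      · simp
      · have := ih (i + 1) e he; omega

-- the min-priority scan over the flat list equals first-match over the groups
lemma pvLoop_flat (text : String) (gs : List (List String × String)) :
    ∀ (i : Int) (d : String),
      (match pvLoop text (pvFlat i gs) none with | some b => b.2 | none => d) = pvFM text gs d := by
  induction gs with
  | nil => intro i d; rfl
  | cons g rest ih =>
      intro i d
      cases g with | mk kws c =>
      simp only [pvFlat, pvFM]
      rw [pvLoop_append, pvLoop_group]
      by_cases h : (kws.any (fun k => PySem.Str.isIn k text)) = true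
      · rw [if_pos h, if_pos h,
          pvLoop_ge text _ i c (by intro e he; have := pvFlat_ge rest (i + 1) e he; omega)]
      · rw [if_neg h, if_neg h]
        exact ih (i + 1) d

set_option maxRecDepth 16384 in
lemma pvItems_anatomy : (pvIndex pvAnatomyGroups).items = pvFlat 0 pvAnatomyGroups := by decide
set_option maxRecDepth 16384 in
lemma pvItems_histology : (pvIndex pvHistologyGroups).items = pvFlat 0 pvHistologyGroups := by decide
set_option maxRecDepth 16384 in
lemma pvItems_pathology : (pvIndex pvPathologyGroups).items = pvFlat 0 pvPathologyGroups := by decide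

-- ===== VERDICT =====
theorem categorize_image_spec : Claim_equal_categorize_image := by
  intro title description source_type _
  unfold Spec_categorize_image categorize_image categorize_image_alt
  by_cases h1 : source_type = "anatomy"
  · subst h1
    rw [show pvKeywordIndex.getD "anatomy" (PySem.Dict.empty, "general") = (pvIndex pvAnatomyGroups, "general") from rfl]
    simp only [pvItems_anatomy]
    rw [pvLoop_flat]
    simp [pvFM, pvAnatomyGroups]
  · by_cases h2 : source_type = "histology"
    · subst h2
      rw [show pvKeywordIndex.getD "histology" (PySem.Dict.empty, "general") = (pvIndex pvHistologyGroups, "organ-systems") from rfl]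
      simp only [pvItems_histology]
      rw [pvLoop_flat]
      simp [pvFM, pvHistologyGroups]
    · by_cases h3 : source_type = "pathology"
      · subst h3
        rw [show pvKeywordIndex.getD "pathology" (PySem.Dict.empty, "general") = (pvIndex pvPathologyGroups, "general") from rfl]
        simp only [pvItems_pathology]
        rw [pvLoop_flat]
        simp [pvFM, pvPathologyGroups]
      · have hc : pvKeywordIndex.contains source_type = false := by
          rw [← Bool.not_eq_true, PySem.Dict.contains_iff_mem_keys,
            show pvKeywordIndex.keys = ["anatomy", "histology", "pathology"] from rfl]
          simp [h1, h2, h3]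
        rw [PySem.Dict.getD_of_not_contains pvKeywordIndex (PySem.Dict.empty, "general") hc]
        rw [if_neg (by simpa using h1), if_neg (by simpa using h2), if_neg (by simpa using h3)]
        rfl
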